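-- pv_equiv track=rewrite | github.com/jroth1111/public-published-skills | skills/codebase-map/scripts/packer/digest_core.py | classify_path_role
-- ===== SOURCE A (Python) =====
-- def classify_path_role(path: str) -> str:
--     if not path:
--         return "other"
--     parts = [part for part in path.lower().split("/") if part]
--     if "routes" in parts:
--         return "routes"
--     if any(part in {"controllers", "handlers", "resolvers"} for part in parts):
--         return "edge"
--     if any(part in {"services", "use-cases", "usecases"} for part in parts):
--         return "services"
--     if any(part in {"domain", "entities", "models"} for part in parts):
--         return "domain"
--     if any(part in {"db", "repository", "repositories", "migrations", "schema"} for part in parts):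
--         return "data"
--     if any(part in {"worker", "workers", "jobs", "queues"} for part in parts):
--         return "worker"
--     if any(part in {"components", "ui", "views"} for part in parts):
--         return "ui"
--     if any(part in {"lib", "utils", "shared"} for part in parts):
--         return "lib"
--     return "other"
-- ===== SOURCE B (Python) =====
-- _RANK = {
--     "routes": 0,
--     "controllers": 1, "handlers": 1, "resolvers": 1,
--     "services": 2, "use-cases": 2, "usecases": 2,
--     "domain": 3, "entities": 3, "models": 3,
--     "db": 4, "repository": 4, "repositories": 4, "migrations": 4, "schema": 4,
--     "worker": 5, "workers": 5, "jobs": 5, "queues": 5,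
--     "components": 6, "ui": 6, "views": 6,
--     "lib": 7, "utils": 7, "shared": 7,
-- }
-- _ROLES = ["routes", "edge", "services", "domain", "data", "worker", "ui", "lib", "other"]
--
-- def classify_path_role(path: str) -> str:
--     best = 8
--     for part in path.lower().split("/"):
--         r = _RANK.get(part, 8)
--         if r < best:
--             best = r
--     return _ROLES[best]
-- ===== Notes on version B (the rewrite author's own statement) =====
-- stated objective: idiomatic
-- what changed: Replaces the eight sequential any()/membership scans over the segment list by one keyword-to-rank dict and a single pass keeping the minimum rank, then indexes a role-name table.
import Mathlib
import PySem

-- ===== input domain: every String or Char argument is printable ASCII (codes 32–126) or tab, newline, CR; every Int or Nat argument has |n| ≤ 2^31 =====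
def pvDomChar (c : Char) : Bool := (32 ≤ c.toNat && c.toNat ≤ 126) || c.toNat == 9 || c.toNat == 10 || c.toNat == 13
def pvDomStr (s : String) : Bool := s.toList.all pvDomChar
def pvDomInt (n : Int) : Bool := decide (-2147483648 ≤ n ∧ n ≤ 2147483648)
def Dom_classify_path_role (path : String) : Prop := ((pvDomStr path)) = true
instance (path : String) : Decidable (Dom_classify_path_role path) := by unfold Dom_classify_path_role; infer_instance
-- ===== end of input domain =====

-- B replaces A's eight sequential membership scans over the segment list by one
-- keyword→rank dict, a single minimum-rank pass, and a role-name table (objective: idiomatic).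

-- ===== PORT A =====
def classify_path_role (path : String) : String :=
  if path = "" then "other"
  else
    -- split: the separator "/" is nonempty, so split? never returns none (getD is a totality guard)
    let parts := ((PySem.Str.split? (PySem.Str.lower path) "/").getD []).filter (fun p => p != "")
    if parts.contains "routes" then "routes"
    else if parts.any (fun p => p == "controllers" || p == "handlers" || p == "resolvers") then "edge"
    else if parts.any (fun p => p == "services" || p == "use-cases" || p == "usecases") then "services"
    else if parts.any (fun p => p == "domain" || p == "entities" || p == "models") then "domain"
    else if parts.any (fun p => p == "db" || p == "repository" || p == "repositories" || p == "migrations" || p == "schema") then "data"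
    else if parts.any (fun p => p == "worker" || p == "workers" || p == "jobs" || p == "queues") then "worker"
    else if parts.any (fun p => p == "components" || p == "ui" || p == "views") then "ui"
    else if parts.any (fun p => p == "lib" || p == "utils" || p == "shared") then "lib"
    else "other"

-- ===== PORT B =====
def pvRank : PySem.Dict String Nat := PySem.Dict.ofList
  [("routes", 0),
   ("controllers", 1), ("handlers", 1), ("resolvers", 1),
   ("services", 2), ("use-cases", 2), ("usecases", 2),
   ("domain", 3), ("entities", 3), ("models", 3),
   ("db", 4), ("repository", 4), ("repositories", 4), ("migrations", 4), ("schema", 4),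
   ("worker", 5), ("workers", 5), ("jobs", 5), ("queues", 5),
   ("components", 6), ("ui", 6), ("views", 6),
   ("lib", 7), ("utils", 7), ("shared", 7)]

def pvRoles : List String :=
  ["routes", "edge", "services", "domain", "data", "worker", "ui", "lib", "other"]

def classify_path_role_alt (path : String) : String :=
  -- split: the separator "/" is nonempty, so split? never returns none (getD is a totality guard)
  let best := ((PySem.Str.split? (PySem.Str.lower path) "/").getD []).foldl
    (fun b part =>
      let r := PySem.Dict.getD pvRank part 8
      if r < b then r else b) 8
  -- _ROLES[best]: best ≤ 8 always holds, so the default is never used (totality guard)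
  pvRoles.getD best "other"

-- ===== PRECONDITION & SPEC =====
def Spec_classify_path_role (path : String) (out : String) : Prop := out = classify_path_role_alt path
instance (path : String) (out : String) : Decidable (Spec_classify_path_role path out) := by unfold Spec_classify_path_role; infer_instance

-- ===== CLAIM (what is proved, stated in full; the proofs are below) =====
def Claim_equal_classify_path_role : Prop := ∀ (path : String), Dom_classify_path_role path → Spec_classify_path_role path (classify_path_role path)

-- ===== LEMMAS AND PROOFS =====

-- rank of a single segment (B's dict lookup)
def pvRankOf (p : String) : Nat := PySem.Dict.getD pvRank p 8

-- recursive form of B's running minimum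
def pvMinR : List String → Nat
  | [] => 8
  | p :: l => min (pvRankOf p) (pvMinR l)

set_option maxRecDepth 8000
set_option maxHeartbeats 1600000

theorem pvRank_mk : pvRank = PySem.Dict.mk
  [("routes", 0),
   ("controllers", 1), ("handlers", 1), ("resolvers", 1),
   ("services", 2), ("use-cases", 2), ("usecases", 2),
   ("domain", 3), ("entities", 3), ("models", 3),
   ("db", 4), ("repository", 4), ("repositories", 4), ("migrations", 4), ("schema", 4),
   ("worker", 5), ("workers", 5), ("jobs", 5), ("queues", 5),
   ("components", 6), ("ui", 6), ("views", 6),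
   ("lib", 7), ("utils", 7), ("shared", 7)] := by rfl

theorem pvRankOf_le (p : String) : pvRankOf p ≤ 8 := by
  rw [pvRankOf, pvRank_mk, PySem.Dict.getD_eq_get?_getD]
  simp only [PySem.Dict.get?, List.find?_cons, List.find?_nil]
  repeat' split
  all_goals simp

theorem pvMinR_le (l : List String) : pvMinR l ≤ 8 := by
  induction l with
  | nil => simp [pvMinR]
  | cons p l ih =>
    have := pvRankOf_le p
    simp only [pvMinR, Nat.min_def]; split <;> assumption

theorem pvFoldl_minR (l : List String) (b : Nat) (hb : b ≤ 8) :
    l.foldl (fun b part =>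
      let r := PySem.Dict.getD pvRank part 8
      if r < b then r else b) b = min b (pvMinR l) := by
  induction l generalizing b with
  | nil => simp only [List.foldl_nil, pvMinR, Nat.min_def]; split_ifs <;> omega
  | cons p l ih =>
    have hrp : PySem.Dict.getD pvRank p 8 ≤ 8 := pvRankOf_le p
    simp only [List.foldl_cons]
    rw [ih (if PySem.Dict.getD pvRank p 8 < b then PySem.Dict.getD pvRank p 8 else b)
        (by split_ifs <;> omega)]
    simp only [pvMinR, pvRankOf, Nat.min_def]
    split_ifs <;> omega

theorem pvMinR_filter (l : List String) :
    pvMinR (l.filter (fun p => p != "")) = pvMinR l := by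
  induction l with
  | nil => rfl
  | cons p l ih =>
    by_cases h : p = ""
    · subst h
      have h8 : pvRankOf "" = 8 := by decide
      have hle := pvMinR_le l
      simp only [List.filter_cons, bne_self_eq_false, Bool.false_eq_true, if_false, ih, pvMinR, h8]
      omega
    · simp only [List.filter_cons, bne_iff_ne, ne_eq, h, not_false_eq_true, if_true, pvMinR, ih]

-- pvRankOf as a plain if-chain on the segment
theorem pvRankOf_eq (p : String) : pvRankOf p =
    (if p == "routes" then 0
     else if p == "controllers" || p == "handlers" || p == "resolvers" then 1
     else if p == "services" || p == "use-cases" || p == "usecases" then 2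
     else if p == "domain" || p == "entities" || p == "models" then 3
     else if p == "db" || p == "repository" || p == "repositories" || p == "migrations" || p == "schema" then 4
     else if p == "worker" || p == "workers" || p == "jobs" || p == "queues" then 5
     else if p == "components" || p == "ui" || p == "views" then 6
     else if p == "lib" || p == "utils" || p == "shared" then 7
     else 8) := by
  by_cases h0 : p = "routes"
  · subst h0; decide
  by_cases h1 : p = "controllers"
  · subst h1; decide
  by_cases h2 : p = "handlers"
  · subst h2; decide
  by_cases h3 : p = "resolvers"
  · subst h3; decide
  by_cases h4 : p = "services"
  · subst h4; decide
  by_cases h5 : p = "use-cases"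
  · subst h5; decide
  by_cases h6 : p = "usecases"
  · subst h6; decide
  by_cases h7 : p = "domain"
  · subst h7; decide
  by_cases h8 : p = "entities"
  · subst h8; decide
  by_cases h9 : p = "models"
  · subst h9; decide
  by_cases h10 : p = "db"
  · subst h10; decide
  by_cases h11 : p = "repository"
  · subst h11; decide
  by_cases h12 : p = "repositories"
  · subst h12; decide
  by_cases h13 : p = "migrations"
  · subst h13; decide
  by_cases h14 : p = "schema"
  · subst h14; decide
  by_cases h15 : p = "worker"
  · subst h15; decide
  by_cases h16 : p = "workers"
  · subst h16; decide
  by_cases h17 : p = "jobs"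
  · subst h17; decide
  by_cases h18 : p = "queues"
  · subst h18; decide
  by_cases h19 : p = "components"
  · subst h19; decide
  by_cases h20 : p = "ui"
  · subst h20; decide
  by_cases h21 : p = "views"
  · subst h21; decide
  by_cases h22 : p = "lib"
  · subst h22; decide
  by_cases h23 : p = "utils"
  · subst h23; decide
  by_cases h24 : p = "shared"
  · subst h24; decide
  rw [pvRankOf, pvRank_mk, PySem.Dict.getD_eq_get?_getD]
  simp only [PySem.Dict.get?, List.find?_cons, List.find?_nil]
  have g0 := beq_eq_false_iff_ne.mpr (Ne.symm h0)
  have f0 := beq_eq_false_iff_ne.mpr h0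
  have g1 := beq_eq_false_iff_ne.mpr (Ne.symm h1)
  have f1 := beq_eq_false_iff_ne.mpr h1
  have g2 := beq_eq_false_iff_ne.mpr (Ne.symm h2)
  have f2 := beq_eq_false_iff_ne.mpr h2
  have g3 := beq_eq_false_iff_ne.mpr (Ne.symm h3)
  have f3 := beq_eq_false_iff_ne.mpr h3
  have g4 := beq_eq_false_iff_ne.mpr (Ne.symm h4)
  have f4 := beq_eq_false_iff_ne.mpr h4
  have g5 := beq_eq_false_iff_ne.mpr (Ne.symm h5)
  have f5 := beq_eq_false_iff_ne.mpr h5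
  have g6 := beq_eq_false_iff_ne.mpr (Ne.symm h6)
  have f6 := beq_eq_false_iff_ne.mpr h6
  have g7 := beq_eq_false_iff_ne.mpr (Ne.symm h7)
  have f7 := beq_eq_false_iff_ne.mpr h7
  have g8 := beq_eq_false_iff_ne.mpr (Ne.symm h8)
  have f8 := beq_eq_false_iff_ne.mpr h8
  have g9 := beq_eq_false_iff_ne.mpr (Ne.symm h9)
  have f9 := beq_eq_false_iff_ne.mpr h9
  have g10 := beq_eq_false_iff_ne.mpr (Ne.symm h10)
  have f10 := beq_eq_false_iff_ne.mpr h10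
  have g11 := beq_eq_false_iff_ne.mpr (Ne.symm h11)
  have f11 := beq_eq_false_iff_ne.mpr h11
  have g12 := beq_eq_false_iff_ne.mpr (Ne.symm h12)
  have f12 := beq_eq_false_iff_ne.mpr h12
  have g13 := beq_eq_false_iff_ne.mpr (Ne.symm h13)
  have f13 := beq_eq_false_iff_ne.mpr h13
  have g14 := beq_eq_false_iff_ne.mpr (Ne.symm h14)
  have f14 := beq_eq_false_iff_ne.mpr h14
  have g15 := beq_eq_false_iff_ne.mpr (Ne.symm h15)
  have f15 := beq_eq_false_iff_ne.mpr h15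
  have g16 := beq_eq_false_iff_ne.mpr (Ne.symm h16)
  have f16 := beq_eq_false_iff_ne.mpr h16
  have g17 := beq_eq_false_iff_ne.mpr (Ne.symm h17)
  have f17 := beq_eq_false_iff_ne.mpr h17
  have g18 := beq_eq_false_iff_ne.mpr (Ne.symm h18)
  have f18 := beq_eq_false_iff_ne.mpr h18
  have g19 := beq_eq_false_iff_ne.mpr (Ne.symm h19)
  have f19 := beq_eq_false_iff_ne.mpr h19
  have g20 := beq_eq_false_iff_ne.mpr (Ne.symm h20)
  have f20 := beq_eq_false_iff_ne.mpr h20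
  have g21 := beq_eq_false_iff_ne.mpr (Ne.symm h21)
  have f21 := beq_eq_false_iff_ne.mpr h21
  have g22 := beq_eq_false_iff_ne.mpr (Ne.symm h22)
  have f22 := beq_eq_false_iff_ne.mpr h22
  have g23 := beq_eq_false_iff_ne.mpr (Ne.symm h23)
  have f23 := beq_eq_false_iff_ne.mpr h23
  have g24 := beq_eq_false_iff_ne.mpr (Ne.symm h24)
  have f24 := beq_eq_false_iff_ne.mpr h24
  simp only [g0, g1, g2, g3, g4, g5, g6, g7, g8, g9, g10, g11, g12, g13, g14, g15, g16, g17, g18, g19, g20, g21, g22, g23, g24, f0, f1, f2, f3, f4, f5, f6, f7, f8, f9, f10, f11, f12, f13, f14, f15, f16, f17, f18, f19, f20, f21, f22, f23, f24]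
  rfl

-- A's eight membership predicates, rewritten as rank equalities
theorem pvPred0 (p : String) : (p == "routes") = (pvRankOf p == 0) := by
  rw [pvRankOf_eq]
  split_ifs <;> simp_all

theorem pvPred1 (p : String) : (p == "controllers" || p == "handlers" || p == "resolvers") = (pvRankOf p == 1) := by
  rw [pvRankOf_eq]
  split_ifs <;> simp_all

theorem pvPred2 (p : String) : (p == "services" || p == "use-cases" || p == "usecases") = (pvRankOf p == 2) := by
  rw [pvRankOf_eq]
  split_ifs <;> simp_all
  all_goals aesop

theorem pvPred3 (p : String) : (p == "domain" || p == "entities" || p == "models") = (pvRankOf p == 3) := by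
  rw [pvRankOf_eq]
  split_ifs <;> simp_all
  all_goals aesop

theorem pvPred4 (p : String) : (p == "db" || p == "repository" || p == "repositories" || p == "migrations" || p == "schema") = (pvRankOf p == 4) := by
  rw [pvRankOf_eq]
  split_ifs <;> simp_all
  all_goals aesop

theorem pvPred5 (p : String) : (p == "worker" || p == "workers" || p == "jobs" || p == "queues") = (pvRankOf p == 5) := by
  rw [pvRankOf_eq]
  split_ifs <;> simp_all
  all_goals aesop

theorem pvPred6 (p : String) : (p == "components" || p == "ui" || p == "views") = (pvRankOf p == 6) := by
  rw [pvRankOf_eq]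
  split_ifs <;> simp_all
  all_goals aesop

theorem pvPred7 (p : String) : (p == "lib" || p == "utils" || p == "shared") = (pvRankOf p == 7) := by
  rw [pvRankOf_eq]
  split_ifs <;> simp_all
  all_goals aesop

-- the minimum rank is the first rank present
theorem pvMinR_firstIdx (l : List String) :
    pvMinR l =
      (if l.any (fun p => pvRankOf p == 0) then 0
       else if l.any (fun p => pvRankOf p == 1) then 1
       else if l.any (fun p => pvRankOf p == 2) then 2
       else if l.any (fun p => pvRankOf p == 3) then 3
       else if l.any (fun p => pvRankOf p == 4) then 4
       else if l.any (fun p => pvRankOf p == 5) then 5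
       else if l.any (fun p => pvRankOf p == 6) then 6
       else if l.any (fun p => pvRankOf p == 7) then 7
       else 8) := by
  induction l with
  | nil => rfl
  | cons p l ih =>
    have hr : pvRankOf p ≤ 8 := pvRankOf_le p
    simp only [pvMinR, List.any_cons, ih]
    obtain ⟨k, hk⟩ : ∃ k, pvRankOf p = k := ⟨_, rfl⟩
    rw [hk] at hr; simp only [hk]
    clear hk ih
    interval_cases k <;>
      · simp only [Nat.min_def]
        simp only [Nat.reduceBEq, beq_self_eq_true, Bool.true_or, Bool.false_or, if_true]
        split_ifs <;> omega

-- A's if-chain computes the role of the minimum rank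
theorem pvChain_eq (l : List String) :
    (if l.contains "routes" then "routes"
     else if l.any (fun p => p == "controllers" || p == "handlers" || p == "resolvers") then "edge"
     else if l.any (fun p => p == "services" || p == "use-cases" || p == "usecases") then "services"
     else if l.any (fun p => p == "domain" || p == "entities" || p == "models") then "domain"
     else if l.any (fun p => p == "db" || p == "repository" || p == "repositories" || p == "migrations" || p == "schema") then "data"
     else if l.any (fun p => p == "worker" || p == "workers" || p == "jobs" || p == "queues") then "worker"
     else if l.any (fun p => p == "components" || p == "ui" || p == "views") then "ui"
     else if l.any (fun p => p == "lib" || p == "utils" || p == "shared") then "lib"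
     else "other") = pvRoles.getD (pvMinR l) "other" := by
  have hc : l.contains "routes" = l.any (fun p => pvRankOf p == 0) := by
    rw [List.contains_eq_any_beq]
    simp only [show ∀ p : String, ("routes" == p) = (pvRankOf p == 0) from
      fun p => by rw [BEq.comm, pvPred0]]
  rw [hc]
  simp only [pvPred1, pvPred2, pvPred3, pvPred4, pvPred5, pvPred6, pvPred7, pvMinR_firstIdx l]
  split_ifs <;> rfl

-- ===== VERDICT (by name: the statement is the Claim_ definition above) =====
theorem classify_path_role_spec : Claim_equal_classify_path_role := by
  intro path _
  unfold Spec_classify_path_role classify_path_role classify_path_role_alt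
  by_cases hp : path = ""
  · subst hp; decide
  · simp only [hp, if_false]
    set l := (PySem.Str.split? (PySem.Str.lower path) "/").getD [] with hl
    rw [pvChain_eq, pvFoldl_minR _ 8 le_rfl, pvMinR_filter]
    have := pvMinR_le l
    congr 1
    omega
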